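-- pv_equiv track=rewrite | github.com/LSoderquist/multiplayer_snake | helpers.py | process_player_data
-- ===== SOURCE A (Python) =====
-- def process_player_data(data):
--     x_vals = []
--     y_vals = []
--     color = None
--     val_is_x = True
--     for val in data:
--         if val.isalpha(): color = val
--         elif val_is_x: x_vals.append(int(val))
--         else: y_vals.append(int(val))
--         val_is_x = not val_is_x
--
--     return [(x, y) for x, y in zip(x_vals, y_vals)], color
-- ===== SOURCE B (Python) =====
-- def process_player_data(data):
--     # Single pass with an online matcher: unmatched coordinate values wait in
--     # queues and a pair is emitted as soon as its partner arrives; no zip step.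
--     pairs = []
--     pend_x = []  # x values waiting for a y partner
--     pend_y = []  # y values waiting for an x partner
--     color = None
--     for i, v in enumerate(data):
--         if v.isalpha():
--             color = v
--         else:
--             n = int(v)
--             if i % 2 == 0:
--                 if pend_y:
--                     pairs.append((n, pend_y.pop(0)))
--                 else:
--                     pend_x.append(n)
--             else:
--                 if pend_x:
--                     pairs.append((pend_x.pop(0), n))
--                 else:
--                     pend_y.append(n)
--     return pairs, color
-- ===== Notes on version B (the rewrite author's own statement) =====
-- stated objective: alternative
-- what changed: Replaces A's build-two-columns-then-zip scheme (toggled x/y boolean, two accumulator lists, final zip) by an online matcher: a single pass keeping queues of unmatched coordinate values and emitting each (x, y) pair as soon as its partner arrives, with no zip step.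
import Mathlib
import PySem

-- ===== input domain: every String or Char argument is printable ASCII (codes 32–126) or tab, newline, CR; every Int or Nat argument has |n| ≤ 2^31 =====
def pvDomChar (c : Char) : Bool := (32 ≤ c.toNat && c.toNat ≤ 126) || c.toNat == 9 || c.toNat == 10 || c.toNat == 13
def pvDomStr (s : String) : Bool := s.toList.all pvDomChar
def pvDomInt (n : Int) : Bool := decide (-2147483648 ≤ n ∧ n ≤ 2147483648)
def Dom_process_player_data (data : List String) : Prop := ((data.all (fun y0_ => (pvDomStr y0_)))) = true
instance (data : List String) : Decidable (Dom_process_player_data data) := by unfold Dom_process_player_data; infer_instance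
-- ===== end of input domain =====

-- B replaces A's build-two-columns-then-zip scheme by an online matcher: one pass with
-- pending-value queues that emits each pair as soon as its partner arrives; same cost.

-- ===== PORT A =====
-- the for-loop of A: state (x_vals, y_vals, color, val_is_x); int(val) is ofStr? (Pre_ rules out none)
def pvLoopA : List String → List Int → List Int → Option String → Bool →
    List Int × List Int × Option String
  | [], xs, ys, c, _ => (xs, ys, c)
  | v :: t, xs, ys, c, b =>
    if PySem.Str.strIsalpha v then pvLoopA t xs ys (some v) (!b)
    else if b then pvLoopA t (xs ++ [(PySem.Int.ofStr? v).getD 0]) ys c (!b)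
    else pvLoopA t xs (ys ++ [(PySem.Int.ofStr? v).getD 0]) c (!b)

def process_player_data (data : List String) : (List (Int × Int)) × Option String :=
  let r := pvLoopA data [] [] none true
  ((r.1.zip r.2.1).map (fun p => (p.1, p.2)), r.2.2)

-- ===== PORT B =====
-- the for-loop of Source B: state (pairs, pend_x, pend_y, color), index i counts up;
-- pop(0) is matching the queue's head
def pvLoopB : List String → Int → List (Int × Int) → List Int → List Int →
    Option String → List (Int × Int) × Option String
  | [], _, pairs, _, _, c => (pairs, c)
  | v :: t, i, pairs, px, py, c =>
    if PySem.Str.strIsalpha v then pvLoopB t (i + 1) pairs px py (some v)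
    else
      let n := (PySem.Int.ofStr? v).getD 0
      if PySem.Int.mod i 2 == 0 then
        match py with
        | y :: py' => pvLoopB t (i + 1) (pairs ++ [(n, y)]) px py' c
        | [] => pvLoopB t (i + 1) pairs (px ++ [n]) py c
      else
        match px with
        | x :: px' => pvLoopB t (i + 1) (pairs ++ [(x, n)]) px' py c
        | [] => pvLoopB t (i + 1) pairs px (py ++ [n]) c

def process_player_data_alt (data : List String) : (List (Int × Int)) × Option String :=
  pvLoopB data 0 [] [] [] none

-- ===== PRECONDITION & SPEC =====
-- Pre_ excludes exactly the inputs where A raises ValueError: a non-alphabetic token int() rejects.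
def Pre_process_player_data (data : List String) : Prop :=
  ∀ v ∈ data, PySem.Str.strIsalpha v = true ∨ (PySem.Int.ofStr? v).isSome = true
instance (data : List String) : Decidable (Pre_process_player_data data) := by
  unfold Pre_process_player_data; infer_instance

def pvWitness_process_player_data : List String := ["1", "2", "red", " 7 ", "-3", "+4"]

def Spec_process_player_data (data : List String) (out : (List (Int × Int)) × Option String) : Prop := out = process_player_data_alt data
instance (data : List String) (out : (List (Int × Int)) × Option String) : Decidable (Spec_process_player_data data out) := by unfold Spec_process_player_data; infer_instance

-- ===== CLAIM (what is proved, stated in full; the proofs are below) =====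
def Claim_equal_process_player_data : Prop := ∀ (data : List String), Dom_process_player_data data → Pre_process_player_data data → Spec_process_player_data data (process_player_data data)

-- ===== LEMMAS AND PROOFS =====

-- the elements A's loop sends to the x-accumulator when it enters with toggle b
-- (to the y-accumulator when it enters with toggle !b)
def pvSel (b : Bool) : List String → List Int
  | [] => []
  | v :: t => if !PySem.Str.strIsalpha v && b
              then (PySem.Int.ofStr? v).getD 0 :: pvSel (!b) t
              else pvSel (!b) t

-- the color both loops end with, starting from c
def pvLastC (c : Option String) : List String → Option String
  | [] => c
  | v :: t => pvLastC (if PySem.Str.strIsalpha v then some v else c) t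

theorem pvLoopA_spec (t : List String) : ∀ (xs ys : List Int) (c : Option String) (b : Bool),
    pvLoopA t xs ys c b = (xs ++ pvSel b t, ys ++ pvSel (!b) t, pvLastC c t) := by
  induction t with
  | nil => intro xs ys c b; simp [pvLoopA, pvSel, pvLastC]
  | cons v t ih =>
    intro xs ys c b
    by_cases ha : PySem.Chars.strIsalpha v.toList
    · simp [pvLoopA, pvSel, pvLastC, ha, ih]
    · cases b <;> simp [pvLoopA, pvSel, pvLastC, ha, ih]

theorem pvMod2_flip (s : Int) :
    (PySem.Int.mod (s + 1) 2 == 0) = !(PySem.Int.mod s 2 == 0) := by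
  rw [PySem.Int.mod_eq_emod_of_pos (show (0:Int) < 2 by omega),
    PySem.Int.mod_eq_emod_of_pos (show (0:Int) < 2 by omega)]
  rcases Int.emod_two_eq s with h2 | h2 <;> simp [Int.add_emod, h2]

-- the matcher invariant: at most one queue is nonempty, and the loop's result is the
-- pending columns extended by the selected columns, zipped behind the emitted pairs
theorem pvLoopB_spec (t : List String) : ∀ (i : Int) (pairs : List (Int × Int))
    (px py : List Int) (c : Option String), (px = [] ∨ py = []) →
    pvLoopB t i pairs px py c =
      (pairs ++ (px ++ pvSel (PySem.Int.mod i 2 == 0) t).zip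
        (py ++ pvSel (!(PySem.Int.mod i 2 == 0)) t), pvLastC c t) := by
  induction t with
  | nil =>
    intro i pairs px py c h
    rcases h with h | h <;> simp [pvLoopB, pvSel, pvLastC, h]
  | cons v t ih =>
    intro i pairs px py c h
    have hmf := pvMod2_flip i
    by_cases ha : PySem.Str.strIsalpha v = true
    · rw [show pvLoopB (v :: t) i pairs px py c = pvLoopB t (i + 1) pairs px py (some v) from by
        simp only [pvLoopB, ha, if_true]]
      rw [ih _ _ _ _ _ h, hmf]
      have ha2 : PySem.Chars.strIsalpha v.toList = true := by simpa [PySem.Str.strIsalpha] using ha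
      simp [pvSel, pvLastC, PySem.Str.strIsalpha, ha2]
    · have ha' : PySem.Str.strIsalpha v = false := by simpa using ha
      have ha2 : PySem.Chars.strIsalpha v.toList = false := by simpa [PySem.Str.strIsalpha] using ha
      by_cases hb : (PySem.Int.mod i 2 == 0) = true
      · cases py with
        | cons y py' =>
          rcases h with h | h
          · subst h
            rw [show pvLoopB (v :: t) i pairs [] (y :: py') c
                = pvLoopB t (i + 1) (pairs ++ [((PySem.Int.ofStr? v).getD 0, y)]) [] py' c from by
              simp only [pvLoopB, ha', hb, Bool.false_eq_true, if_false, if_true]]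
            rw [ih _ _ _ _ _ (Or.inl rfl), hmf, hb]
            simp [pvSel, PySem.Str.strIsalpha, ha2, pvLastC]
          · simp at h
        | nil =>
          rw [show pvLoopB (v :: t) i pairs px [] c
              = pvLoopB t (i + 1) pairs (px ++ [(PySem.Int.ofStr? v).getD 0]) [] c from by
            simp only [pvLoopB, ha', hb, Bool.false_eq_true, if_false, if_true]]
          rw [ih _ _ _ _ _ (Or.inr rfl), hmf, hb]
          simp [pvSel, PySem.Str.strIsalpha, ha2, pvLastC]
      · have hb' : (PySem.Int.mod i 2 == 0) = false := by simpa using hb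
        cases px with
        | cons x px' =>
          rcases h with h | h
          · simp at h
          · subst h
            rw [show pvLoopB (v :: t) i pairs (x :: px') [] c
                = pvLoopB t (i + 1) (pairs ++ [(x, (PySem.Int.ofStr? v).getD 0)]) px' [] c from by
              simp only [pvLoopB, ha', hb', Bool.false_eq_true, if_false]]
            rw [ih _ _ _ _ _ (Or.inr rfl), hmf, hb']
            simp [pvSel, PySem.Str.strIsalpha, ha2, pvLastC]
        | nil =>
          rw [show pvLoopB (v :: t) i pairs [] py c
              = pvLoopB t (i + 1) pairs [] (py ++ [(PySem.Int.ofStr? v).getD 0]) c from by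
            simp only [pvLoopB, ha', hb', Bool.false_eq_true, if_false]]
          rw [ih _ _ _ _ _ (Or.inl rfl), hmf, hb']
          simp [pvSel, PySem.Str.strIsalpha, ha2, pvLastC]

-- ===== VERDICT (by name: the statement is the Claim_ definition above) =====
theorem process_player_data_spec : Claim_equal_process_player_data := by
  intro data _ _
  unfold Spec_process_player_data process_player_data process_player_data_alt
  rw [pvLoopA_spec, pvLoopB_spec data 0 [] [] [] none (Or.inl rfl)]
  simp [PySem.Int.mod]
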